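-- pv_equiv track=rewrite | github.com/zenoy802/AgentLens | backend/app/api/trajectories.py | _select_row_identity_key
-- ===== SOURCE A (Python) =====
-- from typing import Annotated, Any
--
-- _PRIMARY_ROW_IDENTITY_KEY = "_row_identity"
--
-- _FALLBACK_ROW_IDENTITY_KEY = "_agent_lens_row_identity"
--
-- def _select_row_identity_key(rows: list[dict[str, Any]]) -> str:
--     used_keys = {key for row in rows for key in row}
--     if _PRIMARY_ROW_IDENTITY_KEY not in used_keys:
--         return _PRIMARY_ROW_IDENTITY_KEY
--     if _FALLBACK_ROW_IDENTITY_KEY not in used_keys: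
--         return _FALLBACK_ROW_IDENTITY_KEY
--
--     suffix = 2
--     while True:
--         candidate = f"{_FALLBACK_ROW_IDENTITY_KEY}_{suffix}"
--         if candidate not in used_keys:
--             return candidate
--         suffix += 1
-- ===== SOURCE B (Python) =====
-- from typing import Any
--
-- _PRIMARY_ROW_IDENTITY_KEY = "_row_identity"
--
-- _FALLBACK_ROW_IDENTITY_KEY = "_agent_lens_row_identity"
--
--
-- def _select_row_identity_key(rows: list[dict[str, Any]]) -> str:
--     def candidates():
--         yield _PRIMARY_ROW_IDENTITY_KEY
--         yield _FALLBACK_ROW_IDENTITY_KEY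
--         i = 2
--         while True:
--             yield f"{_FALLBACK_ROW_IDENTITY_KEY}_{i}"
--             i += 1
--
--     return next(c for c in candidates() if all(c not in row for row in rows))
-- ===== Notes on version B (the rewrite author's own statement) =====
-- stated objective: idiomatic
-- what changed: Replaces the precomputed used-keys set and the if/if/while chain by a single lazy candidate generator filtered with next(...), testing each candidate by scanning the rows directly.
import Mathlib
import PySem

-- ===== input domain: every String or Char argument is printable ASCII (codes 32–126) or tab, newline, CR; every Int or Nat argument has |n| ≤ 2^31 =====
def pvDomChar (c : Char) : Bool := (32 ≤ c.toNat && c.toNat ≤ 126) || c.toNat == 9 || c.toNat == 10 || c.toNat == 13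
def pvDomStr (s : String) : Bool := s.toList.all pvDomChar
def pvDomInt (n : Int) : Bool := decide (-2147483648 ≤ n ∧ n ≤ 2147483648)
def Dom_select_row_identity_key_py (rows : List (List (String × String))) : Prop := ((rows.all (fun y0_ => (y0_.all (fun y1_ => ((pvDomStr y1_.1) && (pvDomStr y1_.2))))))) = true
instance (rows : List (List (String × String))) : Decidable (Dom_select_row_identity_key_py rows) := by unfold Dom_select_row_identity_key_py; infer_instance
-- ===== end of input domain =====

-- B replaces A's precomputed used-keys set and if/if/while chain by one lazy
-- candidate-stream search that tests each candidate by scanning the rows (idiomatic).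

-- ===== PORT A =====
-- {key for row in rows for key in row}; the while loop carries a fuel bound
-- (total key count + 1) that is never exhausted: the candidates are pairwise distinct.
def pvAloop (used : PySem.Set String) : Nat → Nat → String
  | 0, _ => ""
  | fuel+1, suffix =>
    let candidate := "_agent_lens_row_identity_" ++ toString suffix
    if PySem.Set.contains used candidate then pvAloop used fuel (suffix + 1)
    else candidate

def select_row_identity_key_py (rows : List (List (String × String))) : String :=
  let used : PySem.Set String :=
    PySem.Set.ofList (rows.flatMap (fun row => row.map Prod.fst))
  if !(PySem.Set.contains used "_row_identity") then "_row_identity"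
  else if !(PySem.Set.contains used "_agent_lens_row_identity") then "_agent_lens_row_identity"
  else pvAloop used ((rows.flatMap (fun row => row.map Prod.fst)).length + 1) 2

-- ===== PORT B =====
-- the candidate stream: P, F, F_2, F_3, …
def pvCandB (n : Nat) : String :=
  if n = 0 then "_row_identity"
  else if n = 1 then "_agent_lens_row_identity"
  else "_agent_lens_row_identity_" ++ toString n

-- all(c not in row for row in rows)
def pvUnusedB (rows : List (List (String × String))) (c : String) : Bool :=
  rows.all (fun row => !(row.any (fun kv => kv.1 == c)))

-- next(filter(...)); fuel bound (total key count + 3), never exhausted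
def pvBsearch (rows : List (List (String × String))) : Nat → Nat → String
  | 0, _ => ""
  | fuel+1, n => if pvUnusedB rows (pvCandB n) then pvCandB n else pvBsearch rows fuel (n + 1)

def select_row_identity_key_py_alt (rows : List (List (String × String))) : String :=
  pvBsearch rows ((rows.flatMap (fun row => row.map Prod.fst)).length + 3) 0

-- ===== PRECONDITION & SPEC =====
def Spec_select_row_identity_key_py (rows : List (List (String × String))) (out : String) : Prop := out = select_row_identity_key_py_alt rows
instance (rows : List (List (String × String))) (out : String) : Decidable (Spec_select_row_identity_key_py rows out) := by unfold Spec_select_row_identity_key_py; infer_instance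

-- ===== CLAIM (what is proved, stated in full; the proofs are below) =====
def Claim_equal_select_row_identity_key_py : Prop := ∀ (rows : List (List (String × String))), Dom_select_row_identity_key_py rows → Spec_select_row_identity_key_py rows (select_row_identity_key_py rows)

-- ===== LEMMAS AND PROOFS =====
theorem pv_contains_eq (rows : List (List (String × String))) (c : String) :
    PySem.Set.contains (PySem.Set.ofList (rows.flatMap (fun row => row.map Prod.fst))) c
      = !(pvUnusedB rows c) := by
  rw [Bool.eq_iff_iff, PySem.Set.contains_iff, PySem.Set.mem_ofList]
  simp only [pvUnusedB, List.mem_flatMap, List.mem_map, Bool.not_eq_true',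
    List.all_eq_false]
  constructor
  · rintro ⟨row, hrow, kv, hkv, hk⟩
    refine ⟨row, hrow, ?_⟩
    simp only [Bool.not_eq_false, List.any_eq_true, beq_iff_eq]
    exact ⟨kv, hkv, hk⟩
  · rintro ⟨row, hrow, h⟩
    simp only [Bool.not_eq_false, List.any_eq_true, beq_iff_eq] at h
    obtain ⟨kv, hkv, hk⟩ := h
    exact ⟨row, hrow, kv, hkv, hk⟩

theorem pv_loop_eq (rows : List (List (String × String))) (fuel s : Nat) (hs : 2 ≤ s) :
    pvAloop (PySem.Set.ofList (rows.flatMap (fun row => row.map Prod.fst))) fuel s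
      = pvBsearch rows fuel s := by
  induction fuel generalizing s with
  | zero => rfl
  | succ fuel ih =>
    have hc : pvCandB s = "_agent_lens_row_identity_" ++ toString s := by
      unfold pvCandB
      rw [if_neg (by omega), if_neg (by omega)]
    simp only [pvAloop, pvBsearch, hc, pv_contains_eq]
    rcases hu : pvUnusedB rows ("_agent_lens_row_identity_" ++ toString s) with _ | _
    · exact ih (s + 1) (by omega)
    · simp

-- ===== VERDICT (by name: the statement is the Claim_ definition above) =====
theorem select_row_identity_key_py_spec : Claim_equal_select_row_identity_key_py := by
  intro rows _
  unfold Spec_select_row_identity_key_py select_row_identity_key_py select_row_identity_key_py_alt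
  simp only [pv_contains_eq]
  rcases h0 : pvUnusedB rows "_row_identity" with _ | _
  · rcases h1 : pvUnusedB rows "_agent_lens_row_identity" with _ | _
    · rw [if_neg (by simp), if_neg (by simp), pv_loop_eq rows _ 2 (by omega)]
      have e : ∀ L : Nat, pvBsearch rows (L + 3) 0 = pvBsearch rows (L + 1) 2 := by
        intro L
        show pvBsearch rows (L + 2 + 1) 0 = _
        rw [pvBsearch, show pvCandB 0 = "_row_identity" from rfl, h0, if_neg (by simp)]
        show pvBsearch rows (L + 1 + 1) 1 = _
        rw [pvBsearch, show pvCandB 1 = "_agent_lens_row_identity" from rfl, h1,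
          if_neg (by simp)]
      exact (e _).symm
    · simp [pvBsearch, pvCandB, h0, h1]
  · simp [pvBsearch, pvCandB, h0]
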